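-- pv_equiv track=rewrite | github.com/niklauspeter/alx-higher_level_programming | 0x04-python-more_data_structures/5-number_keys.py | number_keys
-- ===== SOURCE A (Python) =====
-- def number_keys(a_dictionary):
--     sum = 0
--     for x in list(a_dictionary):
--         if x:
--            sum += 1
--         else:
--             return None
--     return sum
-- ===== SOURCE B (Python) =====
-- def number_keys(a_dictionary):
--     return len(a_dictionary) if all(a_dictionary) else None
-- ===== Notes on version B (the rewrite author's own statement) =====
-- stated objective: simpler
-- what changed: Replaces the fused count-and-early-return loop with a separate truthiness check (all) plus a closed-form len, as a one-line conditional expression.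
import Mathlib
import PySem

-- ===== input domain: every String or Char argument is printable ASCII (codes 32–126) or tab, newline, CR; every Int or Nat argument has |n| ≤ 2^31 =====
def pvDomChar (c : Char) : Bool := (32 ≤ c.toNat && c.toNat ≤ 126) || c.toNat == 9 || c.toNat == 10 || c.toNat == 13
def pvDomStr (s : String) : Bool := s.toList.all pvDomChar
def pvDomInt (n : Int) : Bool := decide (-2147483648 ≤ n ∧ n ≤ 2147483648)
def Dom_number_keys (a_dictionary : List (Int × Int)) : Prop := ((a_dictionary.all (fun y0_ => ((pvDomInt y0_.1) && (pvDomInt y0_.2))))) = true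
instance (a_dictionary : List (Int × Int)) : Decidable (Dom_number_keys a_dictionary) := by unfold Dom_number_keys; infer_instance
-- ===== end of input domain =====

-- B separates the truthiness check (all keys nonzero) from the count (len), replacing A's fused accumulator loop; objective: simpler.

-- ===== PORT A =====
-- the loop 'for x in list(a_dictionary): if x: sum += 1 else: return None'
def numberKeysLoop (sum : Int) : List Int → Option Int
  | [] => some sum
  | x :: rest => if x ≠ 0 then numberKeysLoop (sum + 1) rest else none

def number_keys (a_dictionary : List (Int × Int)) : Option Int :=
  numberKeysLoop 0 (a_dictionary.map Prod.fst)

-- ===== PORT B =====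
def number_keys_alt (a_dictionary : List (Int × Int)) : Option Int :=
  if a_dictionary.all (fun kv => kv.1 ≠ 0) then some a_dictionary.length else none

-- ===== PRECONDITION & SPEC =====
def Spec_number_keys (a_dictionary : List (Int × Int)) (out : Option Int) : Prop := out = number_keys_alt a_dictionary
instance (a_dictionary : List (Int × Int)) (out : Option Int) : Decidable (Spec_number_keys a_dictionary out) := by unfold Spec_number_keys; infer_instance

-- ===== CLAIM (what is proved, stated in full; the proofs are below) =====
def Claim_equal_number_keys : Prop := ∀ (a_dictionary : List (Int × Int)), Dom_number_keys a_dictionary → Spec_number_keys a_dictionary (number_keys a_dictionary)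

-- ===== LEMMAS AND PROOFS =====
theorem numberKeysLoop_char (sum : Int) (ks : List Int) :
    numberKeysLoop sum ks = if ks.all (fun k => k ≠ 0) then some (sum + ks.length) else none := by
  induction ks generalizing sum with
  | nil => simp [numberKeysLoop]
  | cons x rest ih =>
    simp only [numberKeysLoop, List.all_cons, List.length_cons]
    by_cases hx : x = 0
    · simp [hx]
    · simp only [hx, ne_eq, not_false_eq_true, if_true, decide_true, Bool.true_and, ih]
      split_ifs <;> (simp; try ring)

-- ===== VERDICT (by name: the statement is the Claim_ definition above) =====
theorem number_keys_spec : Claim_equal_number_keys := by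
  intro d _
  unfold Spec_number_keys number_keys number_keys_alt
  rw [numberKeysLoop_char]
  have h : ∀ (l : List (Int × Int)), (List.map Prod.fst l).all (fun k => k ≠ 0) = l.all (fun kv => kv.1 ≠ 0) := by
    intro l
    induction l with
    | nil => rfl
    | cons p r ih => simp only [List.map_cons, List.all_cons, ih]
  rw [h]
  simp
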